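-- pv_equiv track=rewrite | github.com/JohannesFranzMaastricht/randomPythonScripts | knapsack3bags.py | powerSet2_1
-- ===== SOURCE A (Python) =====
-- def powerSet2_1(items):
--     """returns a list (of list(of lists))"""
--     N = len(items)
--     combo = []
--     # enumerate the 2**N possible combinations
--     for i in range(3**N):
--         combo1 = []
--         combo2 = []
--         for j in range(N):
--             # test bit jth of integer i
--             if (i // 3**j) % 3 == 1:
--                 combo1.append(items[j])
--             if (i // 3**j) % 3 == 2:
--                 combo2.append(items[j])
--         combo.append([combo1, combo2])
--     return combo
-- ===== SOURCE B (Python) =====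
-- def powerSet2_1(items):
--     """returns a list (of list(of lists))"""
--     if not items:
--         return [[[], []]]
--     x = items[0]
--     out = []
--     for c1, c2 in powerSet2_1(items[1:]):
--         out.append([list(c1), list(c2)])
--         out.append([[x] + c1, list(c2)])
--         out.append([list(c1), [x] + c2])
--     return out
-- ===== Notes on version B (the rewrite author's own statement) =====
-- stated objective: alternative
-- what changed: Replaces A's base-3 digit extraction (an outer loop over all 3**N indices with an inner loop re-dividing i by 3**j for each position) by structural recursion on the item list: each assignment for the tail spawns three children (unused / into bag1 / into bag2), so the per-item digit arithmetic disappears.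
import Mathlib
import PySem

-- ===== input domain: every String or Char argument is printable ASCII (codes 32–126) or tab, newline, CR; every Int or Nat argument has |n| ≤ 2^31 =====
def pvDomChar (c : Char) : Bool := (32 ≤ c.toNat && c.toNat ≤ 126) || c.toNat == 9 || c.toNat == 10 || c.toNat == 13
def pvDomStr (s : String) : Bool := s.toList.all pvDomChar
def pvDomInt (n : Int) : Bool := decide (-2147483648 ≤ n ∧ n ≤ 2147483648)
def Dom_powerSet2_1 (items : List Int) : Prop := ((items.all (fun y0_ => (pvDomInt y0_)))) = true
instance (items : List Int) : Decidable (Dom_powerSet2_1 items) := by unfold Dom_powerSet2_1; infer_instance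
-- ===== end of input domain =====

-- B builds the result by structural recursion on the item list (each pair for the tail spawns
-- three children) instead of A's base-3 digit extraction over all 3^N indices: objective 'alternative'.

-- ===== PORT A =====
-- A-side helper: the body of A's inner j-loop — test base-3 digit j of i, append items[j] to the matching bag
def pvInnerStepA (items : List Int) (i : Int) (p : List Int × List Int) (j : Int) :
    List Int × List Int :=
  -- 3**j: j comes from range(N) so 0 ≤ j; 3 ^ j.toNat is exact there
  let p1 := if PySem.Int.mod (PySem.Int.floordiv i ((3 : Int) ^ j.toNat)) 3 = 1 then
      (match PySem.List.pyGet? items j with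
       | some v => p.1 ++ [v]
       | none => p.1)   -- unreachable: 0 ≤ j < len(items), so items[j] never raises
    else p.1
  let p2 := if PySem.Int.mod (PySem.Int.floordiv i ((3 : Int) ^ j.toNat)) 3 = 2 then
      (match PySem.List.pyGet? items j with
       | some v => p.2 ++ [v]
       | none => p.2)   -- unreachable: 0 ≤ j < len(items), so items[j] never raises
    else p.2
  (p1, p2)

-- A-side helper: A's inner loop 'for j in range(N)' building (combo1, combo2) for index i
def pvInnerA (items : List Int) (i : Int) : List Int × List Int :=
  (PySem.List.pyRange 0 (items.length : Int) 1).foldl (pvInnerStepA items i) ([], [])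

-- literal port of A: outer loop over range(3**N), appending [combo1, combo2] each round
def powerSet2_1 (items : List Int) : List (List (List Int)) :=
  (PySem.List.pyRange 0 ((3 : Int) ^ items.length) 1).foldl (fun combo i =>
    combo ++ [[(pvInnerA items i).1, (pvInnerA items i).2]]) []

-- ===== PORT B =====
-- literal port of B: recursion on the first item; each pair of the recursive result spawns three children
def powerSet2_1_alt : List Int → List (List (List Int))
  | [] => [[[], []]]
  | x :: rest =>
    (powerSet2_1_alt rest).foldl (fun out c =>
      match c with
      | [c1, c2] => out ++ [[c1, c2], [x :: c1, c2], [c1, x :: c2]]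
      | _ => out)   -- unreachable: every element of the recursive result is a pair [c1, c2]
      []

-- ===== PRECONDITION & SPEC =====
def Spec_powerSet2_1 (items : List Int) (out : List (List (List Int))) : Prop := out = powerSet2_1_alt items
instance (items : List Int) (out : List (List (List Int))) : Decidable (Spec_powerSet2_1 items out) := by unfold Spec_powerSet2_1; infer_instance

-- ===== CLAIM (what is proved, stated in full; the proofs are below) =====
def Claim_equal_powerSet2_1 : Prop := ∀ (items : List Int), Dom_powerSet2_1 items → Spec_powerSet2_1 items (powerSet2_1 items)

-- ===== LEMMAS AND PROOFS =====

-- the bag selected for "digit d" of index i (d = 1 → bag1, d = 2 → bag2), item 0 on digit 0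
def pvSel (d : Nat) : List Int → Nat → List Int
  | [], _ => []
  | x :: rest, i => (if i % 3 = d then [x] else []) ++ pvSel d rest (i / 3)

-- the per-j contribution of A's inner loop to bag d, as a one-element-or-empty list
def pvU (items : List Int) (i : Int) (d : Int) (j : Int) : List Int :=
  if PySem.Int.mod (PySem.Int.floordiv i ((3 : Int) ^ j.toNat)) 3 = d then
    (match PySem.List.pyGet? items j with
     | some v => [v]
     | none => [])
  else []

theorem pvPairFold (L : List Int) (u w : Int → List Int) :
    ∀ (a b : List Int),
      L.foldl (fun (p : List Int × List Int) j => (p.1 ++ u j, p.2 ++ w j)) (a, b)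
        = (a ++ L.flatMap u, b ++ L.flatMap w) := by
  induction L with
  | nil => simp
  | cons x xs ih => intro a b; simp [List.foldl_cons, ih]

theorem pvUHead (x : Int) (rest : List Int) (i d : Nat) :
    pvU (x :: rest) (i : Int) (d : Int) ((0 : Nat) : Int) = (if i % 3 = d then [x] else []) := by
  have h1 : PySem.Int.floordiv (i : Int) ((3:Int) ^ (((0:Nat):Int)).toNat) = ((i : Nat) : Int) := by
    have e : ((3:Int) ^ (((0:Nat):Int)).toNat) = ((1 : Nat) : Int) := by norm_num
    rw [e, PySem.Int.floordiv_natCast, Nat.div_one]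
  have h2 : PySem.Int.mod ((i : Nat) : Int) 3 = ((i % 3 : Nat) : Int) := by
    have e : (3:Int) = ((3:Nat):Int) := by norm_num
    rw [e, PySem.Int.mod_natCast]
  rw [pvU, h1, h2]
  have hg : PySem.List.pyGet? (x :: rest) ((0:Nat) : Int) = some x := by
    simpa using PySem.List.pyGet?_zero_cons x rest
  rw [hg]
  by_cases h : i % 3 = d
  · rw [if_pos (by exact_mod_cast h), if_pos h]
  · rw [if_neg (by exact_mod_cast h), if_neg h]

theorem pvUShift (x : Int) (rest : List Int) (i d k : Nat) :
    pvU (x :: rest) (i : Int) (d : Int) ((k + 1 : Nat) : Int)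
      = pvU rest ((i / 3 : Nat) : Int) (d : Int) ((k : Nat) : Int) := by
  have ht : (((k + 1 : Nat) : Int)).toNat = k + 1 := by omega
  have hdiv : PySem.Int.floordiv (i : Int) ((3:Int) ^ (k + 1))
      = PySem.Int.floordiv ((i / 3 : Nat) : Int) ((3:Int) ^ (((k:Nat) : Int)).toNat) := by
    have e1 : ((3:Int) ^ (k+1)) = (((3 ^ (k+1) : Nat)) : Int) := by push_cast; ring
    have e2 : ((3:Int) ^ (((k:Nat):Int)).toNat) = (((3 ^ k : Nat)) : Int) := by
      rw [Int.toNat_natCast]; push_cast; ring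
    rw [e1, e2, PySem.Int.floordiv_natCast, PySem.Int.floordiv_natCast]
    congr 1
    rw [Nat.div_div_eq_div_mul]
    congr 1
    ring
  have hget : PySem.List.pyGet? (x :: rest) ((k + 1 : Nat) : Int) = PySem.List.pyGet? rest ((k : Nat) : Int) := by
    have : ((k + 1 : Nat) : Int) = ((k : Nat) : Int) + 1 := by push_cast; ring
    rw [this]; exact PySem.List.pyGet?_cons_succ x rest k
  rw [pvU, pvU, ht, hdiv, hget]

theorem pvRangeFlat (d : Nat) :
    ∀ (items : List Int) (i : Nat),
      (List.range items.length).flatMap (fun k => pvU items (i : Int) (d : Int) ((k : Nat) : Int))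
        = pvSel d items i := by
  intro items
  induction items with
  | nil => intro i; simp [pvSel]
  | cons x rest ih =>
    intro i
    rw [List.length_cons, List.range_succ_eq_map, List.flatMap_cons, List.flatMap_map]
    rw [pvUHead, pvSel]
    congr 1
    have hfe : (fun (k : Nat) => pvU (x :: rest) (i:Int) (d:Int) ((k.succ : Nat) : Int))
        = (fun (k : Nat) => pvU rest ((i / 3 : Nat):Int) (d:Int) ((k : Nat) : Int)) := by
      funext k
      exact pvUShift x rest i d k
    rw [hfe]
    exact ih (i / 3)

theorem pvFlatMapU (d : Nat) (items : List Int) (i : Nat) :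
    (PySem.List.pyRange 0 (items.length : Int) 1).flatMap (pvU items (i : Int) (d : Int))
      = pvSel d items i := by
  rw [PySem.List.pyRange_one, List.flatMap_map]
  have hn : (((items.length : Int)) - 0).toNat = items.length := by omega
  rw [hn]
  have hfe : (fun (k : Nat) => pvU items (i:Int) (d:Int) ((0:Int) + (k:Int)))
      = (fun (k : Nat) => pvU items (i:Int) (d:Int) ((k:Nat):Int)) := by
    funext k; rw [zero_add]
  rw [hfe]
  exact pvRangeFlat d items i

theorem pvInnerAEq (items : List Int) (i : Nat) :
    pvInnerA items (i : Int) = (pvSel 1 items i, pvSel 2 items i) := by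
  have hstep : pvInnerStepA items (i : Int)
      = (fun (p : List Int × List Int) j =>
          (p.1 ++ pvU items (i : Int) 1 j, p.2 ++ pvU items (i : Int) 2 j)) := by
    funext p j
    unfold pvInnerStepA pvU
    cases h : PySem.List.pyGet? items j <;> split_ifs <;> simp
  have e1 : pvU items (i : Int) 1 = pvU items (i : Int) (((1 : Nat)) : Int) := by norm_num
  have e2 : pvU items (i : Int) 2 = pvU items (i : Int) (((2 : Nat)) : Int) := by norm_num
  rw [pvInnerA, hstep, pvPairFold, List.nil_append, List.nil_append, e1, e2,
      pvFlatMapU 1, pvFlatMapU 2]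

theorem pvAChar (items : List Int) :
    powerSet2_1 items
      = (List.range (3 ^ items.length)).map (fun i => [pvSel 1 items i, pvSel 2 items i]) := by
  unfold powerSet2_1
  rw [PySem.List.foldl_append_singleton_eq_map
        (f := fun i => [(pvInnerA items i).1, (pvInnerA items i).2]),
      List.nil_append, PySem.List.pyRange_one, List.map_map]
  rw [show (((3 : Int) ^ items.length) - 0) = ((3 ^ items.length : Nat) : Int) from by
        push_cast; ring,
      Int.toNat_natCast]
  congr 1
  funext k
  simp [pvInnerAEq items k]

theorem pvRangeTriple {α : Type} (f : Nat → α) :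
    ∀ m, (List.range (3 * m)).map f
        = (List.range m).flatMap (fun q => [f (3 * q), f (3 * q + 1), f (3 * q + 2)]) := by
  intro m
  induction m with
  | zero => simp
  | succ n ih =>
    have h3 : 3 * (n + 1) = (3 * n + 1 + 1) + 1 := by omega
    rw [h3, List.range_succ, List.range_succ, List.range_succ, List.range_succ]
    simp [ih]

theorem pvBFold (x : Int) :
    ∀ (M : List (List (List Int))) (acc : List (List (List Int))),
      M.foldl (fun out c =>
        match c with
        | [c1, c2] => out ++ [[c1, c2], [x :: c1, c2], [c1, x :: c2]]
        | _ => out) acc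
      = acc ++ M.flatMap (fun c =>
          match c with
          | [c1, c2] => [[c1, c2], [x :: c1, c2], [c1, x :: c2]]
          | _ => []) := by
  intro M
  induction M with
  | nil => intro acc; simp
  | cons c cs ih =>
    intro acc
    rw [List.foldl_cons, List.flatMap_cons, ih]
    rcases c with _ | ⟨a, _ | ⟨b, _ | _⟩⟩ <;> simp

theorem pvBChar : ∀ (items : List Int),
    powerSet2_1_alt items
      = (List.range (3 ^ items.length)).map (fun i => [pvSel 1 items i, pvSel 2 items i]) := by
  intro items
  induction items with
  | nil => simp [powerSet2_1_alt, pvSel]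
  | cons x rest ih =>
    rw [powerSet2_1_alt, ih, pvBFold, List.flatMap_map]
    rw [List.length_cons, show 3 ^ (rest.length + 1) = 3 * 3 ^ rest.length from by ring,
        pvRangeTriple]
    rw [List.nil_append]
    congr 1
    funext q
    have m0 : (3 * q) % 3 = 0 := by omega
    have d0 : (3 * q) / 3 = q := by omega
    have m1 : (3 * q + 1) % 3 = 1 := by omega
    have d1 : (3 * q + 1) / 3 = q := by omega
    have m2 : (3 * q + 2) % 3 = 2 := by omega
    have d2 : (3 * q + 2) / 3 = q := by omega
    simp [pvSel, m0, d0, m1, d1, m2, d2]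

-- ===== VERDICT (by name: the statement is the Claim_ definition above) =====
theorem powerSet2_1_spec : Claim_equal_powerSet2_1 := by
  intro items _
  unfold Spec_powerSet2_1
  rw [pvAChar, pvBChar]
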